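-- pv_equiv track=rewrite | github.com/HermanSanghera18/CodingBatPy | Warmup-2.py | string_match
-- ===== SOURCE A (Python) =====
-- def string_match(a, b):
--   count = 0
--   if len(a) >= len(b):
--     min = len(b)
--   else:
--     min = len(a)
--
--   for i in range(min-1):
--     target1 = a[i:i+2]
--     target2 = b[i:i+2]
--     if(target1 == target2):
--       count+=1;
--   return count
-- ===== SOURCE B (Python) =====
-- def string_match(a, b):
--     count = 0
--     prev = False
--     for i in range(min(len(a), len(b))):
--         cur = a[i] == b[i]
--         if cur and prev:
--             count += 1
--         prev = cur
--     return count
-- ===== Notes on version B (the rewrite author's own statement) =====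
-- stated objective: faster
-- what changed: Replaces comparing overlapping 2-char slices at each position with a single pass over per-character equality that keeps a running prev-match flag and counts adjacent double matches, avoiding slice-object construction entirely.
import Mathlib
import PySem

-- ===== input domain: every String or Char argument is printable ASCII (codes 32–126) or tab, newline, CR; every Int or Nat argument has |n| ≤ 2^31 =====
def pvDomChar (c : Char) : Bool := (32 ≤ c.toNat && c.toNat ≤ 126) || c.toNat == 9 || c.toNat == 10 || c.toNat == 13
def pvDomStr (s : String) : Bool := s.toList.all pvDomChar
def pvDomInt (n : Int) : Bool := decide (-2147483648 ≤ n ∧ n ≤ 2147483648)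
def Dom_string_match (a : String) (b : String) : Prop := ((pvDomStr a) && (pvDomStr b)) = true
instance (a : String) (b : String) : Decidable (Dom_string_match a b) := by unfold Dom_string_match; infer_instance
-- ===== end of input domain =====

-- B counts adjacent per-character double matches with a running prev-match flag instead of comparing overlapping 2-char slices.

-- ===== PORT A =====
def string_match (a : String) (b : String) : Int :=
  let la := a.toList
  let lb := b.toList
  let m : Int := if (la.length : Int) ≥ (lb.length : Int) then (lb.length : Int) else (la.length : Int)
  (PySem.List.pyRange 0 (m - 1) 1).foldl
    (fun count i =>
      if PySem.List.slice la (some i) (some (i + 2)) = PySem.List.slice lb (some i) (some (i + 2))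
      then count + 1 else count) 0

-- ===== PORT B =====
def string_match_alt (a : String) (b : String) : Int :=
  let la := a.toList
  let lb := b.toList
  let m : Int := min (la.length : Int) (lb.length : Int)
  ((PySem.List.pyRange 0 m 1).foldl
    (fun (s : Int × Bool) i =>
      let cur := PySem.List.pyGet? la i == PySem.List.pyGet? lb i
      ((if cur && s.2 then s.1 + 1 else s.1), cur)) ((0 : Int), false)).1

-- ===== PRECONDITION & SPEC =====
def Spec_string_match (a : String) (b : String) (out : Int) : Prop := out = string_match_alt a b
instance (a : String) (b : String) (out : Int) : Decidable (Spec_string_match a b out) := by unfold Spec_string_match; infer_instance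

-- ===== CLAIM (what is proved, stated in full; the proofs are below) =====
def Claim_equal_string_match : Prop := ∀ (a : String) (b : String), Dom_string_match a b → Spec_string_match a b (string_match a b)

-- ===== LEMMAS AND PROOFS =====

-- B's loop body over naturals
def pvStepB (f : Nat → Bool) (s : Int × Bool) (k : Nat) : Int × Bool :=
  ((if f k && s.2 then s.1 + 1 else s.1), f k)

lemma pvFoldB_snd (f : Nat → Bool) (s : Int × Bool) (n : Nat) :
    ((List.range n).foldl (pvStepB f) s).2 = if n = 0 then s.2 else f (n - 1) := by
  cases n with
  | zero => simp
  | succ m => simp [List.range_succ, pvStepB]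

lemma pvFoldB_fst (f : Nat → Bool) (c : Int) (n : Nat) :
    ((List.range n).foldl (pvStepB f) (c, false)).1
      = c + ((List.range (n - 1)).countP (fun j => f (j + 1) && f j) : Int) := by
  induction n generalizing c with
  | zero => simp
  | succ m ih =>
    rw [List.range_succ, List.foldl_append]
    cases m with
    | zero => simp [pvStepB]
    | succ p =>
      have hsnd := pvFoldB_snd f (c, false) (p + 1)
      simp only [List.foldl_cons, List.foldl_nil, pvStepB]
      rw [hsnd, ih]
      simp only [Nat.succ_sub_one]
      rw [List.range_succ, List.countP_append]
      cases h1 : f (p + 1) <;> cases h2 : f p <;>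
        simp [h1, h2, Int.add_comm, Int.add_left_comm]

lemma pvRange_cast (n : Nat) :
    PySem.List.pyRange 0 (n : Int) 1 = (List.range n).map Nat.cast := by
  rw [PySem.List.pyRange_one]
  simp only [Int.sub_zero, Int.toNat_natCast]
  exact List.map_congr_left (fun k _ => by simp)

-- the per-index predicates agree inside the loop range
lemma pvPred_eq (la lb : List Char) (k : Nat)
    (hk : k + 1 < min la.length lb.length) :
    (decide (PySem.List.slice la (some (k : Int)) (some ((k : Int) + 2))
        = PySem.List.slice lb (some (k : Int)) (some ((k : Int) + 2))))
      = ((la[k + 1]? == lb[k + 1]?) && (la[k]? == lb[k]?)) := by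
  have ha : k + 1 < la.length := lt_of_lt_of_le hk (min_le_left _ _)
  have hb : k + 1 < lb.length := lt_of_lt_of_le hk (min_le_right _ _)
  have h2 : ((k : Int) + 2) = ((k + 2 : Nat) : Int) := by push_cast; ring
  rw [h2, PySem.List.slice_natCast, PySem.List.slice_natCast]
  have hda : la.drop k = la[k] :: la[k + 1] :: la.drop (k + 2) := by
    rw [List.drop_eq_getElem_cons (by omega), List.drop_eq_getElem_cons (by omega)]
  have hdb : lb.drop k = lb[k] :: lb[k + 1] :: lb.drop (k + 2) := by
    rw [List.drop_eq_getElem_cons (by omega), List.drop_eq_getElem_cons (by omega)]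
  rw [hda, hdb]
  simp only [Nat.add_sub_cancel_left, List.take_succ_cons, List.take_zero,
    List.getElem?_eq_getElem ha, List.getElem?_eq_getElem hb,
    List.getElem?_eq_getElem (by omega : k < la.length),
    List.getElem?_eq_getElem (by omega : k < lb.length), List.cons.injEq, and_true]
  by_cases e1 : la[k] = lb[k] <;> by_cases e2 : la[k + 1] = lb[k + 1] <;>
    simp [e1, e2]

lemma pvMain (la lb : List Char) (n : Nat) (hn : n = min la.length lb.length) :
    (PySem.List.pyRange 0 ((n : Int) - 1) 1).foldl
      (fun count i =>
        if PySem.List.slice la (some i) (some (i + 2)) = PySem.List.slice lb (some i) (some (i + 2))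
        then count + 1 else count) 0
    = ((PySem.List.pyRange 0 (n : Int) 1).foldl
        (fun (s : Int × Bool) i =>
          let cur := PySem.List.pyGet? la i == PySem.List.pyGet? lb i
          ((if cur && s.2 then s.1 + 1 else s.1), cur)) ((0 : Int), false)).1 := by
  -- B side
  rw [pvRange_cast, List.foldl_map]
  have hfun : (fun (s : Int × Bool) (k : Nat) =>
      let cur := PySem.List.pyGet? la (k : Int) == PySem.List.pyGet? lb (k : Int)
      ((if cur && s.2 then s.1 + 1 else s.1), cur))
      = pvStepB (fun k => la[k]? == lb[k]?) := by
    funext s k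
    simp [pvStepB, PySem.List.pyGet?_natCast]
  rw [hfun, pvFoldB_fst]
  -- A side
  cases n with
  | zero => simp [PySem.List.pyRange]
  | succ m =>
    rw [show ((m + 1 : Nat) : Int) - 1 = ((m : Nat) : Int) from by push_cast; ring]
    rw [pvRange_cast, List.foldl_map]
    have hcnt := PySem.List.foldl_count_if
      (fun (k : Nat) => decide (PySem.List.slice la (some (k : Int)) (some ((k : Int) + 2))
        = PySem.List.slice lb (some (k : Int)) (some ((k : Int) + 2)))) (List.range m) 0
    simp only [decide_eq_true_eq] at hcnt
    rw [hcnt]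
    simp only [Nat.add_sub_cancel, zero_add]
    congr 1
    apply List.countP_congr
    intro k hk
    rw [List.mem_range] at hk
    rw [pvPred_eq la lb k (by omega)]

-- ===== VERDICT (by name: the statement is the Claim_ definition above) =====
theorem string_match_spec : Claim_equal_string_match := by
  intro a b _
  unfold Spec_string_match string_match string_match_alt
  have hmA : (if (a.toList.length : Int) ≥ (b.toList.length : Int)
      then (b.toList.length : Int) else (a.toList.length : Int))
      = ((min a.toList.length b.toList.length : Nat) : Int) := by
    split_ifs with h <;> omega
  have hmB : min (a.toList.length : Int) (b.toList.length : Int)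
      = ((min a.toList.length b.toList.length : Nat) : Int) := by omega
  simp only [hmA, hmB]
  exact pvMain a.toList b.toList _ rfl
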